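-- pv_equiv track=rewrite | github.com/z3dentalclinic-svg/semantic-agent-backend | filters/l2_filter.py | _compute_word_overlap
-- ===== SOURCE A (Python) =====
-- from typing import Dict, List, Tuple, Optional, Any
--
-- def _compute_word_overlap(
--
--     grey_tails: List[str],
--     ref_words: set
-- ) -> Dict[str, List[str]]:
--     """
--     Для каждого GREY tail: какие reference-слова в нём есть?
--     Returns: {tail: [matched_words]}
--     """
--     if not ref_words:
--         return {tail: [] for tail in grey_tails}
--
--     overlap = {}
--     for tail in grey_tails:
--         tokens = set()
--         for token in tail.lower().split():
--             clean = token.strip('.,;:!?/\\()[]{}"\'-')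
--             if clean and len(clean) >= 2:
--                 tokens.add(clean)
--         matched = sorted(tokens & ref_words)
--         overlap[tail] = matched
--     return overlap
-- ===== SOURCE B (Python) =====
-- from typing import Dict, List
--
--
-- def _compute_word_overlap(
--     grey_tails: List[str],
--     ref_words: set
-- ) -> Dict[str, List[str]]:
--     """Inverted-index, reference-word-major: clean each tail's tokens once, build an
--     index token -> tails containing it, then walk the sorted reference words a single
--     time appending each word to exactly the tails its index entry lists — matched
--     lists come out already sorted, with no per-tail set intersection and no
--     per-tail sort."""
--     token_sets = {}
--     for tail in grey_tails:
--         tokens = set()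
--         for token in tail.lower().split():
--             clean = token.strip('.,;:!?/\\()[]{}"\'-')
--             if clean and len(clean) >= 2:
--                 tokens.add(clean)
--         token_sets[tail] = tokens
--     index = {}
--     for tail, toks in token_sets.items():
--         for token in toks:
--             index.setdefault(token, []).append(tail)
--     overlap = {tail: [] for tail in token_sets}
--     for w in sorted(ref_words):
--         for tail in index.get(w, ()):
--             overlap[tail].append(w)
--     return overlap
-- ===== Notes on version B (the rewrite author's own statement) =====
-- stated objective: alternative
-- what changed: Inverted the computation to be reference-word-major over an inverted index: B cleans each tail's tokens in a first pass, builds an index from token to the tails containing it, then iterates the sorted reference words once, appending each word to exactly the tails its index entry lists, so matched lists are produced already sorted and A's per-tail set intersection and per-tail sort disappear.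
import Mathlib
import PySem

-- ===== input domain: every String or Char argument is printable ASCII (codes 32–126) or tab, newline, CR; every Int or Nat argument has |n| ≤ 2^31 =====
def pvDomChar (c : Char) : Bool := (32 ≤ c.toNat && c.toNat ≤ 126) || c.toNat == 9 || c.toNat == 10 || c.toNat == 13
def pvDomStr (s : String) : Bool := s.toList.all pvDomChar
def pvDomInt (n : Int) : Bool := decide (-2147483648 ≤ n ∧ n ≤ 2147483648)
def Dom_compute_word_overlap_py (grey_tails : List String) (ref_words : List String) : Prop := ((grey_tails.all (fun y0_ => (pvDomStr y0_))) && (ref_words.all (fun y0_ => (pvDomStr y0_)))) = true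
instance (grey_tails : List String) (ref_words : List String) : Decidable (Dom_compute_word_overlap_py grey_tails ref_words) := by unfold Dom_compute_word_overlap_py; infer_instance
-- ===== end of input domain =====

-- B is reference-word-major over an inverted index: it cleans each tail's tokens in a first
-- pass, builds an index token -> tails containing it, then walks the sorted reference words
-- once, appending each word to exactly the tails its index entry lists, so matched lists
-- come out already sorted — no per-tail set intersection and no per-tail sort.


-- Shared helper: the cleaned-token set of one tail (identical inner loop of A and B:
-- lowercase, split on whitespace, strip punctuation, keep cleaned tokens of length ≥ 2).
def pvTokens (tail : String) : PySem.Set String :=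
  (PySem.Str.split₀ (PySem.Str.lower tail)).foldl
    (fun tokens token =>
      let clean := PySem.Str.stripChars token ".,;:!?/\\()[]{}\"'-"
      if clean ≠ "" ∧ 2 ≤ PySem.Str.len clean then PySem.Set.add tokens clean else tokens)
    PySem.Set.empty

-- ===== PORT A =====
-- ref_words is a Python set (modelled as the list of its distinct elements);
-- 'tokens & ref_words' is PySem.Set.inter, 'sorted' is PySem.List.sorted without key.
def compute_word_overlap_py (grey_tails : List String) (ref_words : List String) : List (String × List String) :=
  if ref_words.isEmpty then
    (grey_tails.foldl (fun (d : PySem.Dict String (List String)) tail => d.insert tail [])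
      PySem.Dict.empty).items
  else
    (grey_tails.foldl
      (fun (d : PySem.Dict String (List String)) tail =>
        let tokens := pvTokens tail
        let matched := PySem.List.sorted (PySem.Set.inter tokens ref_words) (fun x => x) false
        d.insert tail matched)
      PySem.Dict.empty).items

-- ===== PORT B =====
-- 'sorted(ref_words)' on the set parameter sorts the set's canonical distinct-element list
-- (PySem.Set.ofList); 'for tail, toks in token_sets.items()' iterates the dict in insertion
-- order (Dict.items); 'index.setdefault(token, []).append(tail)' and 'overlap[tail].append(w)'
-- are Dict.modify with default [] (exact: overlap[tail]'s key is always present, and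
-- setdefault-then-append IS modify-with-default); 'index.get(w, ())' is Dict.getD w [].
-- 'for token in toks' iterates a Python set: its order only decides the KEY order inside
-- index, which is never iterated — index is only read back pointwise — so the returned
-- overlap does not depend on it and the port is exact.
def compute_word_overlap_py_alt (grey_tails : List String) (ref_words : List String) : List (String × List String) :=
  let tokenSets : PySem.Dict String (PySem.Set String) :=
    grey_tails.foldl (fun d tail => d.insert tail (pvTokens tail)) PySem.Dict.empty
  let index : PySem.Dict String (List String) :=
    tokenSets.items.foldl
      (fun ix p => p.2.foldl (fun ix tk => ix.modify tk [] (fun l => l ++ [p.1])) ix)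
      PySem.Dict.empty
  let overlap0 : PySem.Dict String (List String) :=
    tokenSets.keys.foldl (fun d tail => d.insert tail []) PySem.Dict.empty
  ((PySem.List.sorted (PySem.Set.ofList ref_words) (fun x => x) false).foldl
    (fun ov w =>
      (index.getD w []).foldl (fun ov tail => ov.modify tail [] (fun l => l ++ [w])) ov)
    overlap0).items

-- ===== PRECONDITION & SPEC =====
def Spec_compute_word_overlap_py (grey_tails : List String) (ref_words : List String) (out : List (String × List String)) : Prop := out = compute_word_overlap_py_alt grey_tails ref_words
instance (grey_tails : List String) (ref_words : List String) (out : List (String × List String)) : Decidable (Spec_compute_word_overlap_py grey_tails ref_words out) := by unfold Spec_compute_word_overlap_py; infer_instance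

-- ===== CLAIM (what is proved, stated in full; the proofs are below) =====
def Claim_equal_compute_word_overlap_py : Prop := ∀ (grey_tails : List String) (ref_words : List String), Dom_compute_word_overlap_py grey_tails ref_words → Spec_compute_word_overlap_py grey_tails ref_words (compute_word_overlap_py grey_tails ref_words)

-- ===== LEMMAS AND PROOFS =====

-- The token set built by the cleaning loop has no duplicates.
theorem nodup_pvTokens (tail : String) : (pvTokens tail).Nodup := by
  unfold pvTokens
  generalize (PySem.Str.split₀ (PySem.Str.lower tail)) = l
  have h : ∀ (s : PySem.Set String), s.Nodup →
      (l.foldl (fun tokens token =>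
        let clean := PySem.Str.stripChars token ".,;:!?/\\()[]{}\"'-"
        if clean ≠ "" ∧ 2 ≤ PySem.Str.len clean then PySem.Set.add tokens clean else tokens) s).Nodup := by
    induction l with
    | nil => intro s hs; simpa using hs
    | cons x xs ih =>
        intro s hs
        simp only [List.foldl_cons]
        split
        · exact ih _ (PySem.Set.nodup_add _ _ hs)
        · exact ih _ hs
  exact h PySem.Set.empty (by simp [PySem.Set.empty])

-- A nodup list, folded into a set, is itself.
theorem ofList_eq_self {xs : List String} (h : xs.Nodup) : PySem.Set.ofList xs = xs := by
  have key : ∀ (xs s : List String), (s ++ xs).Nodup → xs.foldl PySem.Set.add s = s ++ xs := by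
    intro xs
    induction xs with
    | nil => intro s _; simp
    | cons x t ih =>
        intro s hs
        have hx : x ∉ s := by
          intro hmem
          exact (List.disjoint_of_nodup_append hs) hmem (by simp)
        have hadd : PySem.Set.add s x = s ++ [x] := by
          simp [PySem.Set.add, hx]
        simp only [List.foldl_cons, hadd]
        rw [ih (s ++ [x]) (by simpa using hs)]
        simp
  simpa using key xs [] (by simpa using h)
-- note: PySem.Set.ofList xs is definitionally xs.foldl PySem.Set.add [] (ofList_eq_foldl)

-- getD through an insert loop whose value is a function of the key.
theorem getD_insert_loop {V : Type} (g : String → V) :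
    ∀ (l : List String) (d : PySem.Dict String V) (d0 : V) (t : String),
      (l.foldl (fun d x => d.insert x (g x)) d).getD t d0
        = if t ∈ l then g t else d.getD t d0 := by
  intro l
  induction l with
  | nil => intro d d0 t; simp
  | cons x xs ih =>
      intro d d0 t
      simp only [List.foldl_cons]
      rw [ih]
      by_cases hx : t ∈ xs
      · simp [hx]
      · by_cases ht : t = x
        · subst ht; simp [hx, PySem.Dict.getD_insert_self]
        · simp [hx, ht, PySem.Dict.getD_insert_of_ne _ _ _ ht]

-- A dict with nodup keys is its key list paired with its getD values.
theorem items_eq_keys_map_aux {V : Type} :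
    ∀ (l : List (String × V)) (d0 : V), (l.map Prod.fst).Nodup →
      l = (l.map Prod.fst).map (fun k => (k, (PySem.Dict.mk l).getD k d0)) := by
  intro l
  induction l with
  | nil => intro d0 _; rfl
  | cons p rest ih =>
      intro d0 hnd
      obtain ⟨k, v⟩ := p
      simp only [List.map_cons, List.map_map]
      have hhead : (PySem.Dict.mk ((k, v) :: rest)).getD k d0 = v := by
        simp [PySem.Dict.getD_eq_get?_getD, PySem.Dict.get?_mk_cons]
      have hknot : k ∉ rest.map Prod.fst := (List.nodup_cons.mp (by simpa using hnd)).1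
      have htail : ∀ k' ∈ rest.map Prod.fst,
          (PySem.Dict.mk ((k, v) :: rest)).getD k' d0 = (PySem.Dict.mk rest).getD k' d0 := by
        intro k' hk'
        have : (k == k') = false := by
          simp only [beq_eq_false_iff_ne]; intro h; exact hknot (h ▸ hk')
        simp [PySem.Dict.getD_eq_get?_getD, PySem.Dict.get?_mk_cons, this]
      have hrest := ih d0 (List.nodup_cons.mp (by simpa using hnd)).2
      simp only [hhead]
      refine congrArg₂ List.cons rfl ?_
      rw [← List.map_map]
      calc rest = (rest.map Prod.fst).map (fun k => (k, (PySem.Dict.mk rest).getD k d0)) := hrest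
        _ = (rest.map Prod.fst).map (fun k' => (k', (PySem.Dict.mk ((k, v) :: rest)).getD k' d0)) := by
              apply List.map_congr_left
              intro a ha
              rw [htail a ha]

theorem items_eq_keys_map {V : Type} (d : PySem.Dict String V) (d0 : V) (h : d.keys.Nodup) :
    d.items = d.keys.map (fun k => (k, d.getD k d0)) := by
  obtain ⟨l⟩ := d
  simpa [PySem.Dict.keys, PySem.Dict.items] using
    items_eq_keys_map_aux l d0 (by simpa [PySem.Dict.keys] using h)

-- items of an insert loop over a list, value a function of the key.
theorem items_insert_loop {V : Type} (g : String → V) (l : List String) (d0 : V) :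
    (l.foldl (fun d x => d.insert x (g x)) PySem.Dict.empty).items
      = (PySem.Set.ofList l).map (fun t => (t, g t)) := by
  have hkeys : (l.foldl (fun d x => d.insert x (g x)) PySem.Dict.empty).keys
      = PySem.Set.ofList l := by
    rw [PySem.Dict.keys_foldl_insert l (fun _ x => g x) PySem.Dict.empty]
    simp [PySem.Dict.keys_empty, PySem.Set.update, PySem.Set.ofList]
  rw [items_eq_keys_map _ d0 (by rw [hkeys]; exact PySem.Set.nodup_ofList l), hkeys]
  apply List.map_congr_left
  intro t ht
  rw [getD_insert_loop g l PySem.Dict.empty d0 t, if_pos ((PySem.Set.mem_ofList l t).mp ht)]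

-- getD through an append loop over a nodup key list (the shared shape of B's
-- index-building inner loop and of its overlap-filling inner loop).
theorem append_loop_getD (v : String) :
    ∀ (L : List String) (d : PySem.Dict String (List String)) (t : String), L.Nodup →
      ((L.foldl (fun ov k => ov.modify k [] (fun l => l ++ [v])) d).getD t [])
        = d.getD t [] ++ (if t ∈ L then [v] else []) := by
  intro L
  induction L with
  | nil => intro d t _; simp
  | cons u L' ih =>
      intro d t hnd
      simp only [List.foldl_cons]
      rw [ih _ t (List.nodup_cons.mp hnd).2, PySem.Dict.getD_modify]
      by_cases ht : t = u
      · subst ht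
        rw [if_pos rfl, if_neg (fun h => (List.nodup_cons.mp hnd).1 h),
          if_pos List.mem_cons_self]
        simp
      · rw [if_neg ht]
        by_cases hm : t ∈ L'
        · rw [if_pos hm, if_pos (List.mem_cons.mpr (Or.inr hm))]
        · rw [if_neg hm, if_neg (fun h => hm ((List.mem_cons.mp h).resolve_left ht))]

-- the inverted index maps w to the tails (in tail order) whose token set contains w.
theorem index_getD (tok : String → PySem.Set String) (htok : ∀ t, (tok t).Nodup) :
    ∀ (T : List String) (d : PySem.Dict String (List String)) (w : String),
      (((T.map (fun u => (u, tok u))).foldl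
          (fun ix p => p.2.foldl (fun ix tk => ix.modify tk [] (fun l => l ++ [p.1])) ix)
          d).getD w [])
        = d.getD w [] ++ T.filter (fun t => PySem.Set.contains (tok t) w) := by
  intro T
  induction T with
  | nil => intro d w; simp
  | cons u T' ih =>
      intro d w
      simp only [List.map_cons, List.foldl_cons]
      rw [ih, append_loop_getD u (tok u) d w (htok u), List.filter_cons]
      by_cases hw : w ∈ tok u
      · simp [hw, List.append_assoc]
      · simp [hw]

-- getD through B's outer loop over the sorted reference words.
theorem outer_getD (Lw : String → List String) (hLw : ∀ w, (Lw w).Nodup) :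
    ∀ (ws : List String) (d : PySem.Dict String (List String)) (t : String),
      ((ws.foldl
          (fun ov w => (Lw w).foldl (fun ov k => ov.modify k [] (fun l => l ++ [w])) ov)
          d).getD t [])
        = d.getD t [] ++ ws.filter (fun w => decide (t ∈ Lw w)) := by
  intro ws
  induction ws with
  | nil => intro d t; simp
  | cons w ws' ih =>
      intro d t
      simp only [List.foldl_cons]
      rw [ih, append_loop_getD w (Lw w) d t (hLw w), List.filter_cons]
      by_cases hm : t ∈ Lw w
      · simp [hm, List.append_assoc]
      · simp [hm]

-- keys are unchanged by an append loop whose keys are already present.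
theorem append_loop_keys (v : String) :
    ∀ (L : List String) (d : PySem.Dict String (List String)), (∀ k ∈ L, k ∈ d.keys) →
      ((L.foldl (fun ov k => ov.modify k [] (fun l => l ++ [v])) d).keys) = d.keys := by
  intro L
  induction L with
  | nil => intro d _; rfl
  | cons u L' ih =>
      intro d hmem
      simp only [List.foldl_cons]
      have hkeys : (d.modify u [] (fun l => l ++ [v])).keys = d.keys := by
        rw [PySem.Dict.keys_modify]
        exact PySem.Dict.keys_insert_of_contains _ _
          ((PySem.Dict.contains_iff_mem_keys _ _).mpr (hmem u (by simp)))
      rw [ih _ (fun x hx => by rw [hkeys]; exact hmem x (by simp [hx]))]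
      exact hkeys

theorem outer_keys (Lw : String → List String) :
    ∀ (ws : List String) (d : PySem.Dict String (List String)),
      (∀ w ∈ ws, ∀ k ∈ Lw w, k ∈ d.keys) →
      ((ws.foldl
          (fun ov w => (Lw w).foldl (fun ov k => ov.modify k [] (fun l => l ++ [w])) ov)
          d).keys) = d.keys := by
  intro ws
  induction ws with
  | nil => intro d _; rfl
  | cons w ws' ih =>
      intro d hmem
      simp only [List.foldl_cons]
      have h1 := append_loop_keys w (Lw w) d (hmem w (by simp))
      rw [ih _ (fun x hx k hk => by rw [h1]; exact hmem x (by simp [hx]) k hk)]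
      exact h1

-- Per-tail value: A's sorted intersection is B's filter of the sorted reference words.
theorem matched_filter (tokens : PySem.Set String) (htok : tokens.Nodup) (ref : List String) :
    PySem.List.sorted (PySem.Set.inter tokens ref) (fun x => x) false
      = (PySem.List.sorted (PySem.Set.ofList ref) (fun x => x) false).filter
          (fun w => PySem.Set.contains tokens w) := by
  have hlt := PySem.List.sorted_ofList_pairwise_lt (κ := String) ref
  have hnd : (PySem.List.sorted (PySem.Set.ofList ref) (fun x => x) false).Nodup :=
    ((PySem.List.sorted_perm _ _ _).nodup_iff).mpr (PySem.Set.nodup_ofList ref)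
  apply PySem.List.sorted_eq_of_perm_of_pairwise_lt
  · apply (List.perm_ext_iff_of_nodup (hnd.filter _) (PySem.Set.nodup_inter _ _ htok)).mpr
    intro w
    simp only [List.mem_filter, PySem.List.mem_sorted, PySem.Set.mem_ofList,
      PySem.Set.mem_inter, PySem.Set.contains_iff]
    tauto
  · exact List.Pairwise.filter _ hlt

theorem compute_word_overlap_eq (grey_tails : List String) (ref_words : List String) :
    compute_word_overlap_py grey_tails ref_words = compute_word_overlap_py_alt grey_tails ref_words := by
  -- characterize B's result as T.map (fun t => (t, sortedRef.filter (contains (pvTokens t))))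
  unfold compute_word_overlap_py compute_word_overlap_py_alt
  have hTnd : (PySem.Set.ofList grey_tails).Nodup := PySem.Set.nodup_ofList grey_tails
  set T := PySem.Set.ofList grey_tails with hTdef
  set sortedRef := PySem.List.sorted (PySem.Set.ofList ref_words) (fun x => x) false with hSRdef
  set tokenSets := grey_tails.foldl
      (fun (d : PySem.Dict String (PySem.Set String)) tail => d.insert tail (pvTokens tail))
      PySem.Dict.empty with hTSdef
  have hTSitems : tokenSets.items = T.map (fun t => (t, pvTokens t)) :=
    items_insert_loop pvTokens grey_tails PySem.Set.empty
  have hTSkeys : tokenSets.keys = T := by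
    rw [hTSdef, PySem.Dict.keys_foldl_insert grey_tails (fun _ x => pvTokens x) PySem.Dict.empty]
    simp [PySem.Dict.keys_empty, PySem.Set.update, PySem.Set.ofList, hTdef]
  set overlap0 := tokenSets.keys.foldl
      (fun (d : PySem.Dict String (List String)) tail => d.insert tail [])
      PySem.Dict.empty with hO0def
  have hO0keys : overlap0.keys = T := by
    rw [hO0def, hTSkeys,
      PySem.Dict.keys_foldl_insert T (fun _ _ => ([] : List String)) PySem.Dict.empty]
    simp only [PySem.Dict.keys_empty]
    exact ofList_eq_self hTnd
  have hO0getD : ∀ t, overlap0.getD t [] = [] := by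
    intro t
    rw [hO0def, hTSkeys, getD_insert_loop (fun _ => ([] : List String)) T PySem.Dict.empty [] t]
    split <;> simp [PySem.Dict.getD_empty]
  set index := tokenSets.items.foldl
      (fun (ix : PySem.Dict String (List String)) p =>
        p.2.foldl (fun ix tk => ix.modify tk [] (fun l => l ++ [p.1])) ix)
      PySem.Dict.empty with hIdef
  have hIgetD : ∀ w, index.getD w [] = T.filter (fun t => PySem.Set.contains (pvTokens t) w) := by
    intro w
    rw [hIdef, hTSitems, index_getD pvTokens (fun t => nodup_pvTokens t) T PySem.Dict.empty w]
    simp [PySem.Dict.getD_empty]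
  have hLwnd : ∀ w, (index.getD w []).Nodup := by
    intro w; rw [hIgetD w]; exact hTnd.filter _
  set final := sortedRef.foldl
      (fun (ov : PySem.Dict String (List String)) w =>
        (index.getD w []).foldl (fun ov tail => ov.modify tail [] (fun l => l ++ [w])) ov)
      overlap0 with hFdef
  have hFkeys : final.keys = T := by
    rw [hFdef, outer_keys (fun w => index.getD w []) sortedRef overlap0
      (fun w _ k hk => by
        rw [hO0keys]
        have hk' : k ∈ index.getD w [] := hk
        rw [hIgetD w] at hk'
        exact (List.mem_filter.mp hk').1)]
    exact hO0keys
  have hFgetD : ∀ t ∈ T, final.getD t []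
      = sortedRef.filter (fun w => PySem.Set.contains (pvTokens t) w) := by
    intro t ht
    rw [hFdef, outer_getD (fun w => index.getD w []) hLwnd sortedRef overlap0 t, hO0getD t]
    simp only [List.nil_append]
    apply List.filter_congr
    intro w _
    rw [hIgetD w]
    simp [List.mem_filter, ht]
  have hFitems : final.items
      = T.map (fun t => (t, sortedRef.filter (fun w => PySem.Set.contains (pvTokens t) w))) := by
    rw [items_eq_keys_map final [] (by rw [hFkeys]; exact hTnd), hFkeys]
    exact List.map_congr_left (fun t ht => by rw [hFgetD t ht])
  rw [hFitems]
  -- now the A side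
  by_cases hemp : ref_words.isEmpty
  · rw [if_pos hemp]
    have hnil : ref_words = [] := List.isEmpty_iff.mp hemp
    rw [items_insert_loop (fun _ => ([] : List String)) grey_tails []]
    apply List.map_congr_left
    intro t _
    subst hnil
    rfl
  · rw [if_neg hemp]
    rw [items_insert_loop
      (fun tail => PySem.List.sorted (PySem.Set.inter (pvTokens tail) ref_words) (fun x => x) false)
      grey_tails []]
    apply List.map_congr_left
    intro t _
    exact congrArg _ (matched_filter (pvTokens t) (nodup_pvTokens t) ref_words)

-- ===== VERDICT (by name: the statement is the Claim_ definition above) =====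
theorem compute_word_overlap_py_spec : Claim_equal_compute_word_overlap_py := by
  intro grey_tails ref_words _
  unfold Spec_compute_word_overlap_py
  exact compute_word_overlap_eq grey_tails ref_words
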